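-- pv_equiv track=rewrite | github.com/Foster-AK/Airtype | airtype/ui/settings_shortcuts.py | format_key_combo
-- ===== SOURCE A (Python) =====
-- _MODIFIER_ORDER = {"ctrl": 0, "shift": 1, "alt": 2, "meta": 3}
--
-- def format_key_combo(modifiers: list[str], key: str) -> str:
--     """將修飾鍵列表與主鍵格式化為標準字串（如 ctrl+shift+space）。
--
--     Args:
--         modifiers: 修飾鍵名稱列表（不分大小寫）。
--         key: 主鍵名稱（不可為空）。
--
--     Returns:
--         格式化後的按鍵組合字串。
--
--     Raises:
--         ValueError: key 為空字串時引發。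
--     """
--     if not key:
--         raise ValueError("key 不可為空字串")
--
--     # 正規化為小寫並排序
--     sorted_mods = sorted(
--         (m.lower() for m in modifiers),
--         key=lambda m: _MODIFIER_ORDER.get(m, 99),
--     )
--     parts = sorted_mods + [key.lower()]
--     return "+".join(parts)
-- ===== SOURCE B (Python) =====
-- _MODIFIER_ORDER = {"ctrl": 0, "shift": 1, "alt": 2, "meta": 3}
--
-- def format_key_combo(modifiers: list[str], key: str) -> str:
--     """Bucket (counting-sort) re-implementation: one pass over the modifiers,
--     no call to sorted()."""
--     if not key:
--         raise ValueError("key 不可為空字串")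
--     buckets = ([], [], [], [], [])
--     for m in modifiers:
--         ml = m.lower()
--         buckets[_MODIFIER_ORDER.get(ml, 4)].append(ml)
--     parts = []
--     for b in buckets:
--         parts.extend(b)
--     parts.append(key.lower())
--     return "+".join(parts)
-- ===== Notes on version B (the rewrite author's own statement) =====
-- stated objective: alternative
-- what changed: Replaces the keyed stable sort over the lowered modifiers with a single-pass counting sort into five priority buckets (ctrl/shift/alt/meta/unknown) concatenated in order.
import Mathlib
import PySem

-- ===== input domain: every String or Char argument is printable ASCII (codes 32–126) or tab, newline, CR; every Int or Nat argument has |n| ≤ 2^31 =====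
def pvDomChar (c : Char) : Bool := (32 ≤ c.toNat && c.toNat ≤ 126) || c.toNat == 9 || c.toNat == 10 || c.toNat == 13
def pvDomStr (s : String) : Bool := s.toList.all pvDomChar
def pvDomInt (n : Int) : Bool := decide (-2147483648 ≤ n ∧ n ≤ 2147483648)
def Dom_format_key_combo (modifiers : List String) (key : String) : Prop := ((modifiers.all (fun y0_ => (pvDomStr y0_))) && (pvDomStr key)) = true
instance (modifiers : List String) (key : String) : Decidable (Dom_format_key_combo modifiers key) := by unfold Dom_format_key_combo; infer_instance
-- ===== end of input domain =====

-- B replaces A's keyed stable sort by a one-pass counting sort into five priority buckets (alternative decomposition; return value is equal on key ≠ "").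

-- ===== PORT A =====
def pvMOD : PySem.Dict String Int :=
  PySem.Dict.ofList [("ctrl", 0), ("shift", 1), ("alt", 2), ("meta", 3)]

def format_key_combo (modifiers : List String) (key : String) : String :=
  -- 'if not key: raise ValueError' is excluded by Pre_format_key_combo
  let sorted_mods := PySem.List.sorted (modifiers.map (fun m => PySem.Str.lower m))
      (fun m => pvMOD.getD m 99) false
  PySem.Str.join "+" (sorted_mods ++ [PySem.Str.lower key])

-- ===== PORT B =====
-- one fold step of Source B's loop: lower the modifier and append it to its bucket
def fkcStep (b : List String × List String × List String × List String × List String)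
    (m : String) : List String × List String × List String × List String × List String :=
  let ml := PySem.Str.lower m
  let i := pvMOD.getD ml 4
  if i = 0 then (b.1 ++ [ml], b.2.1, b.2.2.1, b.2.2.2.1, b.2.2.2.2)
  else if i = 1 then (b.1, b.2.1 ++ [ml], b.2.2.1, b.2.2.2.1, b.2.2.2.2)
  else if i = 2 then (b.1, b.2.1, b.2.2.1 ++ [ml], b.2.2.2.1, b.2.2.2.2)
  else if i = 3 then (b.1, b.2.1, b.2.2.1, b.2.2.2.1 ++ [ml], b.2.2.2.2)
  else (b.1, b.2.1, b.2.2.1, b.2.2.2.1, b.2.2.2.2 ++ [ml])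

def format_key_combo_alt (modifiers : List String) (key : String) : String :=
  -- 'if not key: raise ValueError' is excluded by Pre_format_key_combo
  let b := modifiers.foldl fkcStep ([], [], [], [], [])
  PySem.Str.join "+" (b.1 ++ b.2.1 ++ b.2.2.1 ++ b.2.2.2.1 ++ b.2.2.2.2 ++ [PySem.Str.lower key])

-- ===== PRECONDITION & SPEC =====
-- Pre_ excludes only key = "", on which both A and B raise ValueError.
def Pre_format_key_combo (modifiers : List String) (key : String) : Prop := key ≠ ""
instance (modifiers : List String) (key : String) : Decidable (Pre_format_key_combo modifiers key) := by unfold Pre_format_key_combo; infer_instance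
def pvWitness_format_key_combo : List String × String := (["SHIFT", "ctrl", "hyper"], "Space")

def Spec_format_key_combo (modifiers : List String) (key : String) (out : String) : Prop := out = format_key_combo_alt modifiers key
instance (modifiers : List String) (key : String) (out : String) : Decidable (Spec_format_key_combo modifiers key out) := by unfold Spec_format_key_combo; infer_instance

-- ===== CLAIM (what is proved, stated in full; the proofs are below) =====
def Claim_equal_format_key_combo : Prop := ∀ (modifiers : List String) (key : String), Dom_format_key_combo modifiers key → Pre_format_key_combo modifiers key → Spec_format_key_combo modifiers key (format_key_combo modifiers key)

-- ===== LEMMAS AND PROOFS =====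

-- the sort key A uses
def fkcKey (m : String) : Int := pvMOD.getD m 99

set_option maxRecDepth 4000 in
lemma fkcKey_eq (m : String) : fkcKey m =
    if m = "ctrl" then 0 else if m = "shift" then 1 else if m = "alt" then 2
    else if m = "meta" then 3 else 99 := by
  have h : pvMOD = PySem.Dict.mk [("ctrl", 0), ("shift", 1), ("alt", 2), ("meta", 3)] := by decide
  simp only [fkcKey, PySem.Dict.getD, h, PySem.Dict.get?_mk_cons, beq_iff_eq]
  by_cases h1 : m = "ctrl" <;> by_cases h2 : m = "shift" <;> by_cases h3 : m = "alt" <;>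
    by_cases h4 : m = "meta" <;> simp_all [eq_comm, PySem.Dict.get?]

set_option maxRecDepth 4000 in
lemma fkcIdx_eq (m : String) : pvMOD.getD m 4 =
    if m = "ctrl" then 0 else if m = "shift" then 1 else if m = "alt" then 2
    else if m = "meta" then 3 else 4 := by
  have h : pvMOD = PySem.Dict.mk [("ctrl", 0), ("shift", 1), ("alt", 2), ("meta", 3)] := by decide
  simp only [PySem.Dict.getD, h, PySem.Dict.get?_mk_cons, beq_iff_eq]
  by_cases h1 : m = "ctrl" <;> by_cases h2 : m = "shift" <;> by_cases h3 : m = "alt" <;>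
    by_cases h4 : m = "meta" <;> simp_all [eq_comm, PySem.Dict.get?]

-- insertBy passes over a prefix whose elements x does not go before
lemma insertBy_append (x : String) (l r : List String)
    (hl : ∀ y ∈ l, ¬ fkcKey x < fkcKey y) :
    PySem.List.insertBy (fun a b => decide (fkcKey a < fkcKey b)) x (l ++ r)
      = l ++ PySem.List.insertBy (fun a b => decide (fkcKey a < fkcKey b)) x r := by
  induction l with
  | nil => simp
  | cons a l ih =>
    have ha : ¬ fkcKey x < fkcKey a := hl a (by simp)
    simp only [List.cons_append, PySem.List.insertBy, decide_eq_true_eq]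
    rw [if_neg ha]
    simp [ih (fun y hy => hl y (by simp [hy]))]

-- insertBy puts x in front when it goes before everything
lemma insertBy_front (x : String) (r : List String)
    (hr : ∀ y ∈ r, fkcKey x < fkcKey y) :
    PySem.List.insertBy (fun a b => decide (fkcKey a < fkcKey b)) x r = x :: r := by
  cases r with
  | nil => rfl
  | cons a r =>
    simp only [PySem.List.insertBy, decide_eq_true_eq]
    rw [if_pos (hr a (by simp))]

def fkcInv (b0 b1 b2 b3 b4 : List String) : Prop :=
  (∀ y ∈ b0, fkcKey y = 0) ∧ (∀ y ∈ b1, fkcKey y = 1) ∧ (∀ y ∈ b2, fkcKey y = 2) ∧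
  (∀ y ∈ b3, fkcKey y = 3) ∧ (∀ y ∈ b4, fkcKey y = 99)

-- main invariant: A's insertion fold over the concatenated buckets is B's bucket fold
lemma fkc_main (ms : List String) : ∀ b0 b1 b2 b3 b4 : List String,
    fkcInv b0 b1 b2 b3 b4 →
    ms.foldl (fun acc m => PySem.List.insertBy (fun a b => decide (fkcKey a < fkcKey b))
        (PySem.Str.lower m) acc) (b0 ++ b1 ++ b2 ++ b3 ++ b4)
      = (fun t : List String × List String × List String × List String × List String =>
          t.1 ++ t.2.1 ++ t.2.2.1 ++ t.2.2.2.1 ++ t.2.2.2.2)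
        (ms.foldl fkcStep (b0, b1, b2, b3, b4)) := by
  induction ms with
  | nil => intro b0 b1 b2 b3 b4 _; rfl
  | cons m ms ih =>
    intro b0 b1 b2 b3 b4 hInv
    obtain ⟨h0, h1, h2, h3, h4⟩ := hInv
    set x := PySem.Str.lower m with hx
    have hkey := fkcKey_eq x
    simp only [List.foldl_cons, ← hx]
    by_cases c0 : x = "ctrl"
    · have hk : fkcKey x = 0 := by rw [hkey]; simp [c0]
      rw [show b0 ++ b1 ++ b2 ++ b3 ++ b4 = b0 ++ (b1 ++ b2 ++ b3 ++ b4) by simp,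
        insertBy_append x b0 _ (fun y hy => by rw [h0 y hy, hk]; omega),
        insertBy_front x _ (by
          intro y hy; rw [hk]
          simp only [List.mem_append] at hy
          rcases hy with (⟨hy | hy⟩ | hy) | hy
          · rw [h1 y hy]; omega
          · rw [h2 y hy]; omega
          · rw [h3 y hy]; omega
          · rw [h4 y hy]; omega),
        show fkcStep (b0, b1, b2, b3, b4) m = (b0 ++ [x], b1, b2, b3, b4) by
          simp [fkcStep, fkcIdx_eq, ← hx, c0]]
      have := ih (b0 ++ [x]) b1 b2 b3 b4
        ⟨by intro y hy; rcases List.mem_append.1 hy with hy | hy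
            · exact h0 y hy
            · simp at hy; subst hy; exact hk, h1, h2, h3, h4⟩
      simpa using this
    · by_cases c1 : x = "shift"
      · have hk : fkcKey x = 1 := by rw [hkey]; simp [c0, c1]
        rw [show b0 ++ b1 ++ b2 ++ b3 ++ b4 = (b0 ++ b1) ++ (b2 ++ b3 ++ b4) by simp,
          insertBy_append x (b0 ++ b1) _ (by
            intro y hy; rcases List.mem_append.1 hy with hy | hy
            · rw [h0 y hy, hk]; omega
            · rw [h1 y hy, hk]; omega),
          insertBy_front x _ (by
            intro y hy; rw [hk]
            simp only [List.mem_append] at hy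
            rcases hy with (hy | hy) | hy
            · rw [h2 y hy]; omega
            · rw [h3 y hy]; omega
            · rw [h4 y hy]; omega),
          show fkcStep (b0, b1, b2, b3, b4) m = (b0, b1 ++ [x], b2, b3, b4) by
            simp [fkcStep, fkcIdx_eq, ← hx, c0, c1]]
        have := ih b0 (b1 ++ [x]) b2 b3 b4
          ⟨h0, by intro y hy; rcases List.mem_append.1 hy with hy | hy
                  · exact h1 y hy
                  · simp at hy; subst hy; exact hk, h2, h3, h4⟩
        simpa using this
      · by_cases c2 : x = "alt"
        · have hk : fkcKey x = 2 := by rw [hkey]; simp [c0, c1, c2]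
          rw [show b0 ++ b1 ++ b2 ++ b3 ++ b4 = (b0 ++ b1 ++ b2) ++ (b3 ++ b4) by simp,
            insertBy_append x (b0 ++ b1 ++ b2) _ (by
              intro y hy
              simp only [List.mem_append] at hy
              rcases hy with (hy | hy) | hy
              · rw [h0 y hy, hk]; omega
              · rw [h1 y hy, hk]; omega
              · rw [h2 y hy, hk]; omega),
            insertBy_front x _ (by
              intro y hy; rw [hk]
              rcases List.mem_append.1 hy with hy | hy
              · rw [h3 y hy]; omega
              · rw [h4 y hy]; omega),
            show fkcStep (b0, b1, b2, b3, b4) m = (b0, b1, b2 ++ [x], b3, b4) by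
              simp [fkcStep, fkcIdx_eq, ← hx, c0, c1, c2]]
          have := ih b0 b1 (b2 ++ [x]) b3 b4
            ⟨h0, h1, by intro y hy; rcases List.mem_append.1 hy with hy | hy
                        · exact h2 y hy
                        · simp at hy; subst hy; exact hk, h3, h4⟩
          simpa using this
        · by_cases c3 : x = "meta"
          · have hk : fkcKey x = 3 := by rw [hkey]; simp [c0, c1, c2, c3]
            rw [show b0 ++ b1 ++ b2 ++ b3 ++ b4 = (b0 ++ b1 ++ b2 ++ b3) ++ b4 by simp,
              insertBy_append x (b0 ++ b1 ++ b2 ++ b3) _ (by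
                intro y hy
                simp only [List.mem_append] at hy
                rcases hy with ((hy | hy) | hy) | hy
                · rw [h0 y hy, hk]; omega
                · rw [h1 y hy, hk]; omega
                · rw [h2 y hy, hk]; omega
                · rw [h3 y hy, hk]; omega),
              insertBy_front x _ (fun y hy => by rw [hk, h4 y hy]; omega),
              show fkcStep (b0, b1, b2, b3, b4) m = (b0, b1, b2, b3 ++ [x], b4) by
                simp [fkcStep, fkcIdx_eq, ← hx, c0, c1, c2, c3]]
            have := ih b0 b1 b2 (b3 ++ [x]) b4
              ⟨h0, h1, h2, by intro y hy; rcases List.mem_append.1 hy with hy | hy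
                              · exact h3 y hy
                              · simp at hy; subst hy; exact hk, h4⟩
            simpa using this
          · have hk : fkcKey x = 99 := by rw [hkey]; simp [c0, c1, c2, c3]
            rw [show b0 ++ b1 ++ b2 ++ b3 ++ b4 = (b0 ++ b1 ++ b2 ++ b3 ++ b4) ++ [] by simp,
              insertBy_append x _ [] (by
                intro y hy
                simp only [List.mem_append] at hy
                rcases hy with (((hy | hy) | hy) | hy) | hy
                · rw [h0 y hy, hk]; omega
                · rw [h1 y hy, hk]; omega
                · rw [h2 y hy, hk]; omega
                · rw [h3 y hy, hk]; omega
                · rw [h4 y hy, hk]; omega),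
              insertBy_front x [] (by simp),
              show fkcStep (b0, b1, b2, b3, b4) m = (b0, b1, b2, b3, b4 ++ [x]) by
                simp [fkcStep, fkcIdx_eq, ← hx, c0, c1, c2, c3]]
            have := ih b0 b1 b2 b3 (b4 ++ [x])
              ⟨h0, h1, h2, h3, by intro y hy; rcases List.mem_append.1 hy with hy | hy
                                  · exact h4 y hy
                                  · simp at hy; subst hy; exact hk⟩
            simpa using this

-- ===== VERDICT (by name: the statement is the Claim_ definition above) =====
theorem format_key_combo_spec : Claim_equal_format_key_combo := by
  intro modifiers key _ _
  unfold Spec_format_key_combo format_key_combo format_key_combo_alt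
  have hA : PySem.List.sorted (modifiers.map (fun m => PySem.Str.lower m))
      (fun m => pvMOD.getD m 99) false
      = modifiers.foldl (fun acc m =>
          PySem.List.insertBy (fun a b => decide (fkcKey a < fkcKey b))
            (PySem.Str.lower m) acc) [] := by
    rw [PySem.List.sorted_eq_foldl_insertBy, List.foldl_map]
    rfl
  rw [hA]
  have := fkc_main modifiers [] [] [] [] []
    ⟨by simp, by simp, by simp, by simp, by simp⟩
  simp only [List.nil_append] at this
  rw [this]
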